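-- pv_equiv track=rewrite | github.com/bryanthr6/IPC2_Proyecto1_201701010 | procesador.py | agrupar_tuplas
-- ===== SOURCE A (Python) =====
-- def agrupar_tuplas(matriz_binaria):
--     grupos = {}
--     patrones = {}
--     for i, fila in enumerate(matriz_binaria):
--         patron = tuple(fila)
--         if patron not in patrones:
--             patrones[patron] = len(grupos) + 1
--             grupos[len(grupos) + 1] = []
--         grupos[patrones[patron]].append(i)
--     return grupos
-- ===== SOURCE B (Python) =====
-- def agrupar_tuplas(matriz_binaria):
--     # Stage 1: the distinct row patterns, in first-appearance order.
--     distintos = []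
--     for fila in matriz_binaria:
--         if fila not in distintos:
--             distintos.append(fila)
--     # Stage 2: for each pattern, re-scan the matrix collecting its row indices.
--     return {k + 1: [i for i, fila in enumerate(matriz_binaria) if fila == patron]
--             for k, patron in enumerate(distintos)}
-- ===== Notes on version B (the rewrite author's own statement) =====
-- stated objective: alternative
-- what changed: A groups and numbers in one pass over two parallel dicts keyed by pattern and by group number; B uses no grouping dict at all: it first collects the distinct row patterns in first-appearance order, then builds each numbered group by re-scanning the matrix with a filter per pattern.
import Mathlib
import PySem

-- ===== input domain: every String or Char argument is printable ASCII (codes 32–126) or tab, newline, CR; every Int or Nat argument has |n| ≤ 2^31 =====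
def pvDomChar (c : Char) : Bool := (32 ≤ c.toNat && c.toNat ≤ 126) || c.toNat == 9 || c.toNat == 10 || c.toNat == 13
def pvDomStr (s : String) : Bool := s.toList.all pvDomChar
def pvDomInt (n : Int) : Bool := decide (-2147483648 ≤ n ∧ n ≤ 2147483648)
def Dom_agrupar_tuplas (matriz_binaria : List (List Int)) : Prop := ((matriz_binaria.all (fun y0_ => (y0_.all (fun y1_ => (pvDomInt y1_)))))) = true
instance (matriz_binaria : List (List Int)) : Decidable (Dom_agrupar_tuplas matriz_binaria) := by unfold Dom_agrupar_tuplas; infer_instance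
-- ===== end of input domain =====

-- B replaces A's single number-and-group pass over two parallel dicts by a dict-free
-- two-stage algorithm: distinct patterns first, then one filter scan per pattern
-- (objective: alternative).

-- ===== PORT A =====
-- `grupos[patrones[patron]].append(i)` is ported as `modify … [] (· ++ [i])`; that key is
-- always present at that point, so the default [] is never used and the port is exact.
def agrupar_tuplas (matriz_binaria : List (List Int)) : List (Int × List Int) :=
  let fin := (PySem.List.enumerate matriz_binaria).foldl
    (fun (st : PySem.Dict Int (List Int) × PySem.Dict (List Int) Int) p =>
      let i := p.1
      let patron := p.2
      let st :=
        if st.2.contains patron = false then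
          (st.1.insert ((st.1.size : Int) + 1) [],
           st.2.insert patron ((st.1.size : Int) + 1))
        else st
      (st.1.modify (st.2.getD patron 0) [] (fun l => l ++ [i]), st.2))
    (PySem.Dict.empty, PySem.Dict.empty)
  fin.1.items

-- ===== PORT B =====
-- The dict comprehension builds its dict by inserting the pairs in enumeration order;
-- its keys k+1 are pairwise distinct, so each insert appends a fresh entry.
def agrupar_tuplas_alt (matriz_binaria : List (List Int)) : List (Int × List Int) :=
  let distintos := matriz_binaria.foldl
    (fun (d : List (List Int)) fila => if fila ∈ d then d else d ++ [fila]) []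
  let fin := (PySem.List.enumerate distintos).foldl
    (fun (res : PySem.Dict Int (List Int)) p =>
      res.insert (p.1 + 1)
        (((PySem.List.enumerate matriz_binaria).filter (fun q => q.2 == p.2)).map Prod.fst))
    PySem.Dict.empty
  fin.items

-- ===== PRECONDITION & SPEC =====
def Spec_agrupar_tuplas (matriz_binaria : List (List Int)) (out : List (Int × List Int)) : Prop := out = agrupar_tuplas_alt matriz_binaria
instance (matriz_binaria : List (List Int)) (out : List (Int × List Int)) : Decidable (Spec_agrupar_tuplas matriz_binaria out) := by unfold Spec_agrupar_tuplas; infer_instance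

-- ===== CLAIM (what is proved, stated in full; the proofs are below) =====
def Claim_equal_agrupar_tuplas : Prop := ∀ (matriz_binaria : List (List Int)), Dom_agrupar_tuplas matriz_binaria → Spec_agrupar_tuplas matriz_binaria (agrupar_tuplas matriz_binaria)

-- ===== LEMMAS AND PROOFS =====

/-- Abstract model of the grouping state: one step (append index `i` to the group of key `k`). -/
def bstep (L : List (List Int × List Int)) (k : List Int) (i : Int) :
    List (List Int × List Int) :=
  if k ∈ L.map Prod.fst then
    L.map (fun p => if p.1 = k then (p.1, p.2 ++ [i]) else p)
  else L ++ [(k, [i])]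

/-- Abstract model of the grouping loop over the enumerated rows. -/
def bmodel (L : List (List Int × List Int)) : List (List Int) → Int → List (List Int × List Int)
  | [], _ => L
  | r :: rs, s => bmodel (bstep L r s) rs (s + 1)

/-- Items of the numbered dict built from the group-values `vs`, counter starting at `c`. -/
def gruVals : List (List Int) → Nat → List (Int × List Int)
  | [], _ => []
  | v :: vs, n => ((n : Int) + 1, v) :: gruVals vs (n + 1)

/-- Items of A's `patrones` dict for grouping-state `L`: key ↦ 1-based position. -/
def patItems : List (List Int × List Int) → Nat → List (List Int × Int)
  | [], _ => []
  | p :: L, n => (p.1, (n : Int) + 1) :: patItems L (n + 1)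

/-- Indices (with offset `s`) of the rows of `rows` equal to pattern `k`. -/
def occ (rows : List (List Int)) (s : Int) (k : List Int) : List Int :=
  ((PySem.List.enumerate rows s).filter (fun q => q.2 == k)).map Prod.fst

/-- The patterns of `rows` not in `acc`, first-appearance order. -/
def newK (acc : List (List Int)) : List (List Int) → List (List Int)
  | [] => []
  | r :: rs => if r ∈ acc then newK acc rs else r :: newK (acc ++ [r]) rs

theorem length_gruVals (vs : List (List Int)) (n : Nat) :
    (gruVals vs n).length = vs.length := by
  induction vs generalizing n with
  | nil => rfl
  | cons v vs ih => simp [gruVals, ih]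

theorem map_fst_patItems (L : List (List Int × List Int)) (n : Nat) :
    (patItems L n).map Prod.fst = L.map Prod.fst := by
  induction L generalizing n with
  | nil => rfl
  | cons p L ih => simp [patItems, ih]

theorem mem_gruVals_bound {q : Int × List Int} (vs : List (List Int)) (n : Nat)
    (h : q ∈ gruVals vs n) : (n : Int) < q.1 ∧ q.1 ≤ (n : Int) + vs.length := by
  induction vs generalizing n with
  | nil => simp [gruVals] at h
  | cons v vs ih =>
    simp only [gruVals, List.mem_cons] at h
    rcases h with h | h
    · subst h; simp only [List.length_cons]; push_cast; omega
    · have := ih (n + 1) h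
      simp only [List.length_cons]
      push_cast at this ⊢
      omega

theorem nodup_gruVals_keys (vs : List (List Int)) (n : Nat) :
    ((gruVals vs n).map Prod.fst).Nodup := by
  induction vs generalizing n with
  | nil => simp [gruVals]
  | cons v vs ih =>
    simp only [gruVals, List.map_cons, List.nodup_cons]
    refine ⟨?_, ih (n + 1)⟩
    intro hmem
    rcases List.mem_map.mp hmem with ⟨q, hq, hk⟩
    have := mem_gruVals_bound vs (n + 1) hq
    push_cast at this
    omega

theorem gruVals_append (vs ws : List (List Int)) (n : Nat) :
    gruVals (vs ++ ws) n = gruVals vs n ++ gruVals ws (n + vs.length) := by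
  induction vs generalizing n with
  | nil => simp [gruVals]
  | cons v vs ih =>
    simp only [List.cons_append, gruVals, ih, List.length_cons]
    have : n + 1 + vs.length = n + (vs.length + 1) := by omega
    rw [this]

theorem patItems_append (vs ws : List (List Int × List Int)) (n : Nat) :
    patItems (vs ++ ws) n = patItems vs n ++ patItems ws (n + vs.length) := by
  induction vs generalizing n with
  | nil => simp [patItems]
  | cons v vs ih =>
    simp only [List.cons_append, patItems, ih, List.length_cons]
    have : n + 1 + vs.length = n + (vs.length + 1) := by omega
    rw [this]

/-- `patItems` depends only on the keys. -/
theorem patItems_eq_of_map_fst {L L' : List (List Int × List Int)}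
    (h : L.map Prod.fst = L'.map Prod.fst) (n : Nat) : patItems L n = patItems L' n := by
  induction L generalizing L' n with
  | nil => cases L' <;> simp_all [patItems]
  | cons p L ih =>
    cases L' with
    | nil => simp at h
    | cons q L' =>
      simp only [List.map_cons, List.cons.injEq] at h
      simp [patItems, h.1, ih h.2]

/-- A map that fixes every entry whose key is not `k` is the identity away from `k`. -/
theorem map_skip {κ α : Type} (L : List (κ × α)) (k : κ) (g : κ × α → κ × α)
    (hg : ∀ p : κ × α, p.1 ≠ k → g p = p) (h : k ∉ L.map Prod.fst) : L.map g = L := by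
  have : L.map g = L.map id := by
    apply List.map_congr_left
    intro p hp
    exact hg p (fun hpk => h (List.mem_map.mpr ⟨p, hp, hpk⟩))
  rw [this, List.map_id]

theorem map_fst_bstep (L : List (List Int × List Int)) (k : List Int) (i : Int) :
    (bstep L k i).map Prod.fst =
      if k ∈ L.map Prod.fst then L.map Prod.fst else L.map Prod.fst ++ [k] := by
  unfold bstep
  split_ifs with h
  · rw [List.map_map]
    apply List.map_congr_left
    intro p _
    by_cases hp : p.1 = k <;> simp [hp]
  · simp

theorem nodup_bstep {L : List (List Int × List Int)} (k : List Int) (i : Int)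
    (h : (L.map Prod.fst).Nodup) : ((bstep L k i).map Prod.fst).Nodup := by
  rw [map_fst_bstep]
  split_ifs with hk
  · exact h
  · apply List.Nodup.append h (List.nodup_singleton _)
    intro a ha hb
    rw [List.mem_singleton] at hb
    subst hb
    exact hk ha

/-- In the member case, `bstep` just rewrites the matched entry. -/
theorem bstep_decomp (L₁ L₂ : List (List Int × List Int)) (k : List Int) (w : List Int)
    (i : Int) (h₁ : k ∉ L₁.map Prod.fst) (h₂ : k ∉ L₂.map Prod.fst) :
    bstep (L₁ ++ (k, w) :: L₂) k i = L₁ ++ (k, w ++ [i]) :: L₂ := by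
  unfold bstep
  rw [if_pos (by simp), List.map_append, List.map_cons]
  rw [map_skip L₁ k _ (fun p hp => if_neg hp) h₁,
      map_skip L₂ k _ (fun p hp => if_neg hp) h₂]
  simp

/-- A list with nodup keys containing key `k` splits around its unique `k`-entry. -/
theorem exists_decomp {L : List (List Int × List Int)} {k : List Int}
    (h : (L.map Prod.fst).Nodup) (hk : k ∈ L.map Prod.fst) :
    ∃ L₁ w L₂, L = L₁ ++ (k, w) :: L₂ ∧ k ∉ L₁.map Prod.fst ∧ k ∉ L₂.map Prod.fst := by
  obtain ⟨p₀, hp₀, hpk⟩ := List.mem_map.mp hk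
  obtain ⟨a, w⟩ := p₀
  simp only at hpk
  subst hpk
  obtain ⟨L₁, L₂, hL⟩ := List.append_of_mem hp₀
  subst hL
  rw [List.map_append, List.map_cons] at h
  refine ⟨L₁, w, L₂, rfl, ?_, ?_⟩
  · intro hmem
    exact (List.disjoint_of_nodup_append h) hmem (by simp)
  · have := (List.nodup_append.mp h).2.1
    simp only [List.nodup_cons] at this
    exact this.1

/-- The key of a `Dict.mk` literal is absent iff it is not among the first components. -/
theorem contains_mk_false {κ ν : Type} [BEq κ] [LawfulBEq κ] [DecidableEq κ]
    (L : List (κ × ν)) (k : κ) (h : k ∉ L.map Prod.fst) :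
    (PySem.Dict.mk L).contains k = false := by
  rw [PySem.Dict.contains_eq_decide_mem_keys, PySem.Dict.keys_mk]
  simpa using h

theorem contains_mk_true {κ ν : Type} [BEq κ] [LawfulBEq κ] [DecidableEq κ]
    (L : List (κ × ν)) (k : κ) (h : k ∈ L.map Prod.fst) :
    (PySem.Dict.mk L).contains k = true := by
  rw [PySem.Dict.contains_eq_decide_mem_keys, PySem.Dict.keys_mk]
  simpa using h

/-- A's combined step, on the abstract state. -/
theorem astep_eq (L : List (List Int × List Int)) (k : List Int) (s : Int)
    (h : (L.map Prod.fst).Nodup) :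
    (let st : PySem.Dict Int (List Int) × PySem.Dict (List Int) Int :=
        (PySem.Dict.mk (gruVals (L.map Prod.snd) 0), PySem.Dict.mk (patItems L 0))
     let st :=
        if st.2.contains k = false then
          (st.1.insert ((st.1.size : Int) + 1) [],
           st.2.insert k ((st.1.size : Int) + 1))
        else st
     (st.1.modify (st.2.getD k 0) [] (fun l => l ++ [s]), st.2)) =
    (PySem.Dict.mk (gruVals ((bstep L k s).map Prod.snd) 0),
     PySem.Dict.mk (patItems (bstep L k s) 0)) := by
  have hsize : (PySem.Dict.mk (gruVals (L.map Prod.snd) 0)).size = L.length := by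
    show (gruVals (L.map Prod.snd) 0).length = L.length
    rw [length_gruVals, List.length_map]
  simp only []
  by_cases hk : k ∈ L.map Prod.fst
  · -- existing pattern: the if-branch is skipped, the matched group gets `s` appended
    have hc : (PySem.Dict.mk (patItems L 0)).contains k = true := by
      apply contains_mk_true
      rw [map_fst_patItems]
      exact hk
    rw [hc, if_neg (by simp)]
    obtain ⟨L₁, w, L₂, rfl, h₁, h₂⟩ := exists_decomp h hk
    have hbs := bstep_decomp L₁ L₂ k w s h₁ h₂
    have hpat : patItems (bstep (L₁ ++ (k, w) :: L₂) k s) 0 = patItems (L₁ ++ (k, w) :: L₂) 0 := by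
      apply patItems_eq_of_map_fst
      rw [hbs]
      simp
    have hsplit : patItems (L₁ ++ (k, w) :: L₂) 0
        = patItems L₁ 0 ++ (k, ((0 + L₁.length : Nat) : Int) + 1) :: patItems L₂ (0 + L₁.length + 1) := by
      rw [patItems_append]
      rfl
    have hgd : (PySem.Dict.mk (patItems (L₁ ++ (k, w) :: L₂) 0)).getD k 0
        = ((L₁.length : Int) + 1) := by
      have hmem : (k, ((L₁.length : Int) + 1)) ∈ patItems (L₁ ++ (k, w) :: L₂) 0 := by
        rw [hsplit]
        simp
      apply PySem.Dict.getD_of_mem_items _ hmem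
      rw [PySem.Dict.keys_mk]
      show ((patItems _ 0).map Prod.fst).Nodup
      rw [map_fst_patItems]
      exact h
    rw [hgd, hpat]
    congr 1
    have hvs : (L₁ ++ (k, w) :: L₂).map Prod.snd = L₁.map Prod.snd ++ w :: L₂.map Prod.snd := by
      simp
    have hvs' : (bstep (L₁ ++ (k, w) :: L₂) k s).map Prod.snd
        = L₁.map Prod.snd ++ (w ++ [s]) :: L₂.map Prod.snd := by
      rw [hbs]; simp
    have hgsplit : gruVals ((L₁ ++ (k, w) :: L₂).map Prod.snd) 0
        = gruVals (L₁.map Prod.snd) 0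
          ++ (((0 + L₁.length : Nat) : Int) + 1, w) :: gruVals (L₂.map Prod.snd) (0 + L₁.length + 1) := by
      rw [hvs, gruVals_append, List.length_map]
      rfl
    have hnod : ((gruVals ((L₁ ++ (k, w) :: L₂).map Prod.snd) 0).map Prod.fst).Nodup :=
      nodup_gruVals_keys _ 0
    have hgd2 : (PySem.Dict.mk (gruVals ((L₁ ++ (k, w) :: L₂).map Prod.snd) 0)).getD
        ((L₁.length : Int) + 1) [] = w := by
      apply PySem.Dict.getD_of_mem_items
      · rw [hgsplit]; simp
      · rw [PySem.Dict.keys_mk]; exact hnod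
    have hcg : (PySem.Dict.mk (gruVals ((L₁ ++ (k, w) :: L₂).map Prod.snd) 0)).contains
        ((L₁.length : Int) + 1) = true := by
      apply contains_mk_true
      rw [hgsplit]
      simp
    have hm : (PySem.Dict.mk (gruVals ((L₁ ++ (k, w) :: L₂).map Prod.snd) 0)).modify
          ((L₁.length : Int) + 1) [] (fun l => l ++ [s])
        = (PySem.Dict.mk (gruVals ((L₁ ++ (k, w) :: L₂).map Prod.snd) 0)).insert
          ((L₁.length : Int) + 1)
          ((PySem.Dict.mk (gruVals ((L₁ ++ (k, w) :: L₂).map Prod.snd) 0)).getD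
            ((L₁.length : Int) + 1) [] ++ [s]) := rfl
    rw [hm, hgd2]
    apply PySem.Dict.ext
    rw [PySem.Dict.items_insert_of_contains _ _ hcg]
    show (gruVals ((L₁ ++ (k, w) :: L₂).map Prod.snd) 0).map _
      = gruVals ((bstep (L₁ ++ (k, w) :: L₂) k s).map Prod.snd) 0
    rw [hvs', gruVals_append, List.length_map, hgsplit, List.map_append, List.map_cons]
    have e₁ : (gruVals (L₁.map Prod.snd) 0).map
        (fun p => if (p.1 == (L₁.length : Int) + 1) = true then ((L₁.length : Int) + 1, w ++ [s]) else p)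
        = gruVals (L₁.map Prod.snd) 0 := by
      refine map_skip _ ((L₁.length : Int) + 1) _ (fun p hp => by simp [hp]) ?_
      intro hmem
      obtain ⟨q, hq, hq1⟩ := List.mem_map.mp hmem
      have := mem_gruVals_bound _ _ hq
      rw [hq1] at this
      simp only [List.length_map] at this
      omega
    have e₂ : (gruVals (L₂.map Prod.snd) (0 + L₁.length + 1)).map
        (fun p => if (p.1 == (L₁.length : Int) + 1) = true then ((L₁.length : Int) + 1, w ++ [s]) else p)
        = gruVals (L₂.map Prod.snd) (0 + L₁.length + 1) := by
      refine map_skip _ ((L₁.length : Int) + 1) _ (fun p hp => by simp [hp]) ?_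
      intro hmem
      obtain ⟨q, hq, hq1⟩ := List.mem_map.mp hmem
      have := mem_gruVals_bound _ _ hq
      rw [hq1] at this
      push_cast at this
      omega
    rw [e₁, e₂]
    simp [gruVals]
  · -- fresh pattern: both dicts gain an entry numbered |L| + 1
    have hc : (PySem.Dict.mk (patItems L 0)).contains k = false := by
      apply contains_mk_false
      rw [map_fst_patItems]
      exact hk
    rw [hc, if_pos rfl, hsize]
    have hbs : bstep L k s = L ++ [(k, [s])] := by
      unfold bstep
      rw [if_neg hk]
    have hgdp : ((PySem.Dict.mk (patItems L 0)).insert k ((L.length : Int) + 1)).getD k 0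
        = (L.length : Int) + 1 := PySem.Dict.getD_insert_self _ _ _ _
    rw [hgdp]
    have hnewkey : ((L.length : Int) + 1) ∉ (gruVals (L.map Prod.snd) 0).map Prod.fst := by
      intro hmem
      obtain ⟨q, hq, hq1⟩ := List.mem_map.mp hmem
      have := mem_gruVals_bound _ _ hq
      rw [hq1] at this
      simp only [List.length_map] at this
      omega
    have hci : (PySem.Dict.mk (gruVals (L.map Prod.snd) 0)).contains ((L.length : Int) + 1)
        = false := contains_mk_false _ _ hnewkey
    have hins : ((PySem.Dict.mk (gruVals (L.map Prod.snd) 0)).insert ((L.length : Int) + 1) []).items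
        = gruVals (L.map Prod.snd) 0 ++ [((L.length : Int) + 1, [])] :=
      PySem.Dict.items_insert_of_not_contains _ _ hci
    have hgd3 : ((PySem.Dict.mk (gruVals (L.map Prod.snd) 0)).insert ((L.length : Int) + 1) []).getD
        ((L.length : Int) + 1) [] = [] := PySem.Dict.getD_insert_self _ _ _ _
    have hm : ((PySem.Dict.mk (gruVals (L.map Prod.snd) 0)).insert ((L.length : Int) + 1) []).modify
          ((L.length : Int) + 1) [] (fun l => l ++ [s])
        = ((PySem.Dict.mk (gruVals (L.map Prod.snd) 0)).insert ((L.length : Int) + 1) []).insert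
          ((L.length : Int) + 1)
          (((PySem.Dict.mk (gruVals (L.map Prod.snd) 0)).insert ((L.length : Int) + 1) []).getD
            ((L.length : Int) + 1) [] ++ [s]) := rfl
    congr 1
    · rw [hm, hgd3]
      apply PySem.Dict.ext
      rw [PySem.Dict.items_insert_of_contains _ _ (PySem.Dict.contains_insert_self _ _ _), hins]
      rw [List.map_append]
      have e₁ : (gruVals (L.map Prod.snd) 0).map
          (fun p => if (p.1 == (L.length : Int) + 1) = true then ((L.length : Int) + 1, [] ++ [s]) else p)
          = gruVals (L.map Prod.snd) 0 :=
        map_skip _ _ _ (fun p hp => by simp [hp]) hnewkey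
      rw [e₁, hbs]
      rw [List.map_append, gruVals_append]
      simp [gruVals]
    · apply PySem.Dict.ext
      rw [PySem.Dict.items_insert_of_not_contains _ _ hc]
      rw [hbs, patItems_append]
      show patItems L 0 ++ [(k, (L.length : Int) + 1)] = patItems L 0 ++ patItems [(k, [s])] (0 + L.length)
      simp [patItems]

/-- A's fold, run over the enumerated rows, follows the abstract model. -/
theorem foldA_eq (rows : List (List Int)) (s : Int) (L : List (List Int × List Int))
    (h : (L.map Prod.fst).Nodup) :
    (PySem.List.enumerate rows s).foldl
      (fun (st : PySem.Dict Int (List Int) × PySem.Dict (List Int) Int) p =>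
        let i := p.1
        let patron := p.2
        let st :=
          if st.2.contains patron = false then
            (st.1.insert ((st.1.size : Int) + 1) [],
             st.2.insert patron ((st.1.size : Int) + 1))
          else st
        (st.1.modify (st.2.getD patron 0) [] (fun l => l ++ [i]), st.2))
      (PySem.Dict.mk (gruVals (L.map Prod.snd) 0), PySem.Dict.mk (patItems L 0))
     = (PySem.Dict.mk (gruVals ((bmodel L rows s).map Prod.snd) 0),
        PySem.Dict.mk (patItems (bmodel L rows s) 0)) := by
  induction rows generalizing s L with
  | nil => simp [PySem.List.enumerate, bmodel]
  | cons r rs ih =>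
    rw [PySem.List.enumerate_cons]
    simp only [List.foldl_cons]
    have h1 := astep_eq L r s h
    simp only [] at h1
    rw [h1]
    exact ih (s + 1) (bstep L r s) (nodup_bstep r s h)

theorem occ_cons (r : List Int) (rs : List (List Int)) (s : Int) (k : List Int) :
    occ (r :: rs) s k = (if r = k then [s] else []) ++ occ rs (s + 1) k := by
  unfold occ
  rw [PySem.List.enumerate_cons, List.filter_cons]
  by_cases h : r = k <;> simp [h]

theorem newK_cons (acc : List (List Int)) (r : List Int) (rs : List (List Int)) :
    newK acc (r :: rs) = if r ∈ acc then newK acc rs else r :: newK (acc ++ [r]) rs := rfl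

theorem mem_newK_not_mem {k : List Int} (rows : List (List Int)) (acc : List (List Int))
    (h : k ∈ newK acc rows) : k ∉ acc := by
  induction rows generalizing acc with
  | nil => simp [newK] at h
  | cons r rs ih =>
    rw [newK_cons] at h
    split_ifs at h with hr
    · exact ih acc h
    · rcases List.mem_cons.mp h with h | h
      · subst h; exact hr
      · intro hacc
        exact (ih (acc ++ [r]) h) (List.mem_append_left _ hacc)

/-- The dedup fold equals the accumulator followed by the fresh patterns. -/
theorem dedup_fold_eq (rows : List (List Int)) (acc : List (List Int)) :
    rows.foldl (fun (d : List (List Int)) fila => if fila ∈ d then d else d ++ [fila]) acc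
      = acc ++ newK acc rows := by
  induction rows generalizing acc with
  | nil => simp [newK]
  | cons r rs ih =>
    simp only [List.foldl_cons]
    rw [newK_cons]
    split_ifs with hr
    · exact ih acc
    · rw [ih (acc ++ [r]), List.append_assoc]
      rfl

/-- Characterisation of the grouping model: existing groups extended by their
occurrence indices, fresh patterns appended with theirs. -/
theorem bmodel_eq (rows : List (List Int)) (s : Int) (L : List (List Int × List Int)) :
    bmodel L rows s =
      L.map (fun p => (p.1, p.2 ++ occ rows s p.1))
        ++ (newK (L.map Prod.fst) rows).map (fun k => (k, occ rows s k)) := by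
  induction rows generalizing s L with
  | nil =>
    simp [bmodel, newK, occ, PySem.List.enumerate]
  | cons r rs ih =>
    show bmodel (bstep L r s) rs (s + 1) = _
    rw [ih (s + 1) (bstep L r s), map_fst_bstep]
    by_cases hr : r ∈ L.map Prod.fst
    · rw [if_pos hr]
      have hK : newK (L.map Prod.fst) (r :: rs) = newK (L.map Prod.fst) rs := by
        rw [newK_cons, if_pos hr]
      rw [hK]
      congr 1
      · -- existing entries
        unfold bstep
        rw [if_pos hr, List.map_map]
        apply List.map_congr_left
        intro p _
        by_cases hp : p.1 = r
        · simp only [Function.comp, hp]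
          rw [occ_cons, if_pos rfl]
          simp [List.append_assoc]
        · simp only [Function.comp, if_neg hp]
          rw [occ_cons, if_neg (fun h => hp h.symm)]
          simp
      · -- fresh patterns
        apply List.map_congr_left
        intro k hk
        have hkr : k ≠ r := by
          intro h; subst h
          exact (mem_newK_not_mem rs _ hk) hr
        rw [occ_cons, if_neg (fun h => hkr h.symm)]
        simp
    · rw [if_neg hr]
      have hK : newK (L.map Prod.fst) (r :: rs) = r :: newK (L.map Prod.fst ++ [r]) rs := by
        rw [newK_cons, if_neg hr]
      rw [hK]
      have hbs : bstep L r s = L ++ [(r, [s])] := by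
        unfold bstep; rw [if_neg hr]
      rw [hbs, List.map_append]
      simp only [List.map_cons, List.map_nil, List.cons_append, List.nil_append]
      rw [List.append_assoc]
      congr 1
      · apply List.map_congr_left
        intro p hp
        have hpr : p.1 ≠ r := by
          intro h
          exact hr (List.mem_map.mpr ⟨p, hp, h⟩)
        rw [occ_cons, if_neg (fun h => hpr h.symm)]
        simp
      · simp only [List.cons_append, List.nil_append]
        congr 1
        · rw [occ_cons, if_pos rfl]
          simp
        · apply List.map_congr_left
          intro k hk
          have hkr : k ≠ r := by
            intro h; subst h
            exact (mem_newK_not_mem rs _ hk) (List.mem_append_right _ (by simp))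
          rw [occ_cons, if_neg (fun h => hkr h.symm)]
          simp

/-- Inserting strictly increasing fresh keys `p.1 + 1` just appends the entries. -/
theorem insfold_eq (xs : List (List Int)) (c : Int) (f : List Int → List Int)
    (M : List (Int × List Int)) (hb : ∀ q ∈ M, q.1 ≤ c) :
    (PySem.List.enumerate xs c).foldl
      (fun (res : PySem.Dict Int (List Int)) p => res.insert (p.1 + 1) (f p.2))
      (PySem.Dict.mk M)
    = PySem.Dict.mk (M ++ (PySem.List.enumerate xs c).map (fun p => (p.1 + 1, f p.2))) := by
  induction xs generalizing c M with
  | nil => simp [PySem.List.enumerate]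
  | cons x xs ih =>
    rw [PySem.List.enumerate_cons]
    simp only [List.foldl_cons, List.map_cons]
    have hcf : (PySem.Dict.mk M).contains (c + 1) = false := by
      apply contains_mk_false
      intro hmem
      obtain ⟨q, hq, hq1⟩ := List.mem_map.mp hmem
      have := hb q hq
      omega
    have hins : (PySem.Dict.mk M).insert (c + 1) (f x)
        = PySem.Dict.mk (M ++ [(c + 1, f x)]) := by
      apply PySem.Dict.ext
      exact PySem.Dict.items_insert_of_not_contains _ _ hcf
    rw [hins, ih (c + 1) (M ++ [(c + 1, f x)]) ?_]
    · rw [List.append_assoc]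
      rfl
    · intro q hq
      rcases List.mem_append.mp hq with hq | hq
      · exact le_trans (hb q hq) (by omega)
      · rw [List.mem_singleton] at hq; subst hq; simp

/-- `gruVals` is the enumeration of the value list shifted by one. -/
theorem gruVals_eq_enumerate (vs : List (List Int)) (n : Nat) :
    gruVals vs n = (PySem.List.enumerate vs (n : Int)).map (fun p => (p.1 + 1, p.2)) := by
  induction vs generalizing n with
  | nil => simp [gruVals, PySem.List.enumerate]
  | cons v vs ih =>
    rw [PySem.List.enumerate_cons]
    show ((n : Int) + 1, v) :: gruVals vs (n + 1) = _
    simp only [List.map_cons]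
    rw [ih (n + 1)]
    push_cast
    rfl

theorem enumerate_map (xs : List (List Int)) (f : List Int → List Int) (c : Int) :
    PySem.List.enumerate (xs.map f) c
      = (PySem.List.enumerate xs c).map (fun p => (p.1, f p.2)) := by
  induction xs generalizing c with
  | nil => simp [PySem.List.enumerate]
  | cons x xs ih =>
    rw [List.map_cons, PySem.List.enumerate_cons, PySem.List.enumerate_cons]
    simp [ih]

-- ===== VERDICT (by name: the statement is the Claim_ definition above) =====
theorem agrupar_tuplas_spec : Claim_equal_agrupar_tuplas := by
  intro m _
  unfold Spec_agrupar_tuplas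
  have hA : agrupar_tuplas m = gruVals ((bmodel [] m 0).map Prod.snd) 0 := by
    unfold agrupar_tuplas
    rw [show (PySem.Dict.empty : PySem.Dict Int (List Int))
          = PySem.Dict.mk (gruVals (([] : List (List Int × List Int)).map Prod.snd) 0) from rfl,
        show (PySem.Dict.empty : PySem.Dict (List Int) Int)
          = PySem.Dict.mk (patItems [] 0) from rfl]
    rw [foldA_eq m 0 [] (by simp)]
  have hmod : bmodel ([] : List (List Int × List Int)) m 0
      = (newK [] m).map (fun k => (k, occ m 0 k)) := by
    rw [bmodel_eq m 0 []]
    simp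
  have hB : agrupar_tuplas_alt m
      = (PySem.List.enumerate (newK [] m) 0).map (fun p => (p.1 + 1, occ m 0 p.2)) := by
    show ((PySem.List.enumerate (m.foldl
        (fun (d : List (List Int)) fila => if fila ∈ d then d else d ++ [fila]) []) 0).foldl
      (fun (res : PySem.Dict Int (List Int)) p =>
        res.insert (p.1 + 1)
          (((PySem.List.enumerate m 0).filter (fun q => q.2 == p.2)).map Prod.fst))
      PySem.Dict.empty).items = _
    rw [dedup_fold_eq m [], List.nil_append]
    rw [show (PySem.Dict.empty : PySem.Dict Int (List Int)) = PySem.Dict.mk [] from rfl]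
    rw [insfold_eq (newK [] m) 0
      (fun k => ((PySem.List.enumerate m 0).filter (fun q => q.2 == k)).map Prod.fst) []
      (by simp)]
    rfl
  rw [hA, hmod, hB, gruVals_eq_enumerate]
  simp only [Nat.cast_zero, List.map_map]
  rw [enumerate_map]
  rw [List.map_map]
  rfl
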